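-- pv_equiv track=rewrite | github.com/petthauk/chess_ml | util/util.py | move_from_to
-- ===== SOURCE A (Python) =====
-- def move_from_to(pos, move):
--     """
--     Returns a list with from-position and to-position
--     :param pos: current position
--     :param move: move from current position
--     :return: [[from_x, from_y], [to_x, to_y]]
--     """
--     ret_list = [0 for _ in range(64)]
--     for i in range(len(ret_list)):
--         if int(i / 8) == pos[0] and i % 8 == pos[1]:
--             ret_list[i] = -1
--         elif int(i / 8) == pos[0]+move[0] and i % 8 == pos[1]+move[1]:
--             ret_list[i] = 1
--     return ret_list
-- ===== SOURCE B (Python) =====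
-- def move_from_to(pos, move):
--     """
--     Returns a list with from-position and to-position
--     :param pos: current position
--     :param move: move from current position
--     :return: [[from_x, from_y], [to_x, to_y]]
--     """
--     p0, p1 = pos[0], pos[1]
--     t0, t1 = p0 + move[0], p1 + move[1]
--     ret = [0] * 64
--     if 0 <= t0 < 8 and 0 <= t1 < 8:
--         ret[t0 * 8 + t1] = 1
--     if 0 <= p0 < 8 and 0 <= p1 < 8:
--         ret[p0 * 8 + p1] = -1
--     return ret
-- ===== Notes on version B (the rewrite author's own statement) =====
-- stated objective: simpler
-- what changed: Instead of scanning all 64 board cells and testing each against the from/to coordinates, B computes the two flat indices directly (pos[0]*8+pos[1] and the moved counterpart) and writes 1 then -1 into a zeroed 64-list under explicit 0..7 bounds checks, preserving A's -1 priority when the cells coincide.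
import Mathlib
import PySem

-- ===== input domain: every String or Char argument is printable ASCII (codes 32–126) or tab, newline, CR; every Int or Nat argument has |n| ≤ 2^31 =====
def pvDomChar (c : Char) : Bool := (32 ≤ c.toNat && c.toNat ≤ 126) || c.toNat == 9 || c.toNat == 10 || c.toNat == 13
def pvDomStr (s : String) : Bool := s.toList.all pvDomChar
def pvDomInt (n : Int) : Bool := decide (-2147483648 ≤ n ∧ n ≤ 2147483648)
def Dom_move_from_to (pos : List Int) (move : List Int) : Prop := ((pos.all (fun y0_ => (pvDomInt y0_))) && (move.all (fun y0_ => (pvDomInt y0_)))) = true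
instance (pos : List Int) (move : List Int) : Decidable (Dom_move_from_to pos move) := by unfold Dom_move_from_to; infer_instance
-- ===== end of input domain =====

-- B replaces A's 64-cell scan by direct computation of the two flat indices (simpler: no loop, two guarded writes).


-- ===== PORT A =====
-- Literal port of A: ret_list = [0]*64 built from range(64); a scan over range(len(ret_list))
-- setting index i to -1 on the from-cell, 1 on the to-cell.  `int(i / 8)` is ported as floor
-- division, exact here since i ≥ 0; list indexing pos[0]/pos[1]/move[0]/move[1] is ported with
-- pyGetD (Python raises IndexError on shorter lists; Pre_ excludes exactly those).
def move_from_to (pos : List Int) (move : List Int) : List Int :=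
  let ret := (PySem.List.pyRange 0 64 1).map (fun _ => (0 : Int))
  (PySem.List.pyRange 0 (PySem.List.len ret) 1).foldl
    (fun r i =>
      if PySem.Int.floordiv i 8 = PySem.List.pyGetD pos 0 0 ∧
         PySem.Int.mod i 8 = PySem.List.pyGetD pos 1 0 then
        PySem.List.pySetD r i (-1)
      else if PySem.Int.floordiv i 8 = PySem.List.pyGetD pos 0 0 + PySem.List.pyGetD move 0 0 ∧
              PySem.Int.mod i 8 = PySem.List.pyGetD pos 1 0 + PySem.List.pyGetD move 1 0 then
        PySem.List.pySetD r i 1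
      else r)
    ret

-- ===== PORT B =====
-- Literal port of B: compute the two flat indices, write 1 then -1 into a zeroed 64-list
-- under 0..7 bounds checks (pos/move indexing via pyGetD, as above).
def move_from_to_alt (pos : List Int) (move : List Int) : List Int :=
  let p0 := PySem.List.pyGetD pos 0 0
  let p1 := PySem.List.pyGetD pos 1 0
  let t0 := p0 + PySem.List.pyGetD move 0 0
  let t1 := p1 + PySem.List.pyGetD move 1 0
  let ret := List.replicate 64 (0 : Int)
  let ret := if 0 ≤ t0 ∧ t0 < 8 ∧ 0 ≤ t1 ∧ t1 < 8 then PySem.List.pySetD ret (t0 * 8 + t1) 1 else ret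
  if 0 ≤ p0 ∧ p0 < 8 ∧ 0 ≤ p1 ∧ p1 < 8 then PySem.List.pySetD ret (p0 * 8 + p1) (-1) else ret

-- ===== PRECONDITION & SPEC =====
-- Python A indexes pos[0], pos[1], move[0], move[1] during the scan and raises IndexError
-- whenever either list has fewer than two elements; Pre_ excludes exactly those inputs.
def Pre_move_from_to (pos : List Int) (move : List Int) : Prop :=
  2 ≤ pos.length ∧ 2 ≤ move.length
instance (pos : List Int) (move : List Int) : Decidable (Pre_move_from_to pos move) := by
  unfold Pre_move_from_to; infer_instance
def pvWitness_move_from_to : List Int × List Int := ([1, 2], [1, 0])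

def Spec_move_from_to (pos : List Int) (move : List Int) (out : List Int) : Prop := out = move_from_to_alt pos move
instance (pos : List Int) (move : List Int) (out : List Int) : Decidable (Spec_move_from_to pos move out) := by unfold Spec_move_from_to; infer_instance

-- ===== CLAIM (what is proved, stated in full; the proofs are below) =====
def Claim_equal_move_from_to : Prop := ∀ (pos : List Int) (move : List Int), Dom_move_from_to pos move → Pre_move_from_to pos move → Spec_move_from_to pos move (move_from_to pos move)

-- ===== LEMMAS AND PROOFS =====

-- The scan step of A, abstracted over the two cell tests.
def pvStep (c1 c2 : Int → Prop) [DecidablePred c1] [DecidablePred c2]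
    (r : List Int) (k : Nat) : List Int :=
  if c1 (k : Int) then r.set k (-1) else if c2 (k : Int) then r.set k 1 else r

lemma pvStep_length (c1 c2 : Int → Prop) [DecidablePred c1] [DecidablePred c2]
    (r : List Int) (k : Nat) : (pvStep c1 c2 r k).length = r.length := by
  unfold pvStep; split_ifs <;> simp

lemma pvFold_length (c1 c2 : Int → Prop) [DecidablePred c1] [DecidablePred c2]
    (n : Nat) (l : List Int) :
    ((List.range n).foldl (pvStep c1 c2) l).length = l.length := by
  induction n with
  | zero => simp
  | succ n ih =>
    rw [List.range_succ, List.foldl_append, List.foldl_cons, List.foldl_nil,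
        pvStep_length, ih]

-- Entry j of A's scan: set to -1 / 1 / untouched according to the two tests, for visited indices.
lemma pvFold_getElem? (c1 c2 : Int → Prop) [DecidablePred c1] [DecidablePred c2]
    (n : Nat) (l : List Int) : n ≤ l.length → ∀ j : Nat,
    ((List.range n).foldl (pvStep c1 c2) l)[j]? =
      if j < n then
        (if c1 (j : Int) then some (-1) else if c2 (j : Int) then some 1 else l[j]?)
      else l[j]? := by
  induction n with
  | zero => intro _ j; simp
  | succ n ih =>
    intro hn j
    rw [List.range_succ, List.foldl_append, List.foldl_cons, List.foldl_nil]
    have hlen := pvFold_length c1 c2 n l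
    have hn' : n < l.length := by omega
    have ihj := ih (by omega) j
    by_cases hjn : j = n
    · rw [hjn, if_pos (Nat.lt_succ_self n)]
      have hR : ((List.range n).foldl (pvStep c1 c2) l)[n]? = l[n]? := by
        rw [ih (by omega) n]; simp
      generalize hG : (List.range n).foldl (pvStep c1 c2) l = R at hlen hR ⊢
      simp only [pvStep]
      split_ifs with h1 h2
      · rw [List.getElem?_set]; simp [hlen, hn']
      · rw [List.getElem?_set]; simp [hlen, hn']
      · exact hR
    · have hne : ¬ (n = j) := fun h => hjn h.symm
      generalize hG : (List.range n).foldl (pvStep c1 c2) l = R at ihj ⊢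
      have hstep : (pvStep c1 c2 R n)[j]? = R[j]? := by
        simp only [pvStep]
        split_ifs
        · rw [List.getElem?_set]; simp [hne]
        · rw [List.getElem?_set]; simp [hne]
        · rfl
      rw [hstep, ihj]
      by_cases hlt : j < n
      · have : j < n + 1 := by omega
        simp [hlt, this]
      · have : ¬ j < n + 1 := by omega
        simp [hlt, this]

-- Entry j of B's two guarded writes.
lemma pvAlt_getElem? (p0 p1 q0 q1 : Int) (j : Nat) (hj : j < 64) :
    (if 0 ≤ p0 ∧ p0 < 8 ∧ 0 ≤ p1 ∧ p1 < 8 then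
        PySem.List.pySetD
          (if 0 ≤ q0 ∧ q0 < 8 ∧ 0 ≤ q1 ∧ q1 < 8 then
              PySem.List.pySetD (List.replicate 64 (0 : Int)) (q0 * 8 + q1) 1
            else List.replicate 64 (0 : Int)) (p0 * 8 + p1) (-1)
      else
        (if 0 ≤ q0 ∧ q0 < 8 ∧ 0 ≤ q1 ∧ q1 < 8 then
            PySem.List.pySetD (List.replicate 64 (0 : Int)) (q0 * 8 + q1) 1
          else List.replicate 64 (0 : Int)))[j]? =
      if 0 ≤ p0 ∧ p0 < 8 ∧ 0 ≤ p1 ∧ p1 < 8 ∧ (j : Int) = p0 * 8 + p1 then some (-1)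
      else if 0 ≤ q0 ∧ q0 < 8 ∧ 0 ≤ q1 ∧ q1 < 8 ∧ (j : Int) = q0 * 8 + q1 then some 1
      else some 0 := by
  by_cases hP : 0 ≤ p0 ∧ p0 < 8 ∧ 0 ≤ p1 ∧ p1 < 8
  · have hpn : (0 : Int) ≤ p0 * 8 + p1 := by omega
    by_cases hQ : 0 ≤ q0 ∧ q0 < 8 ∧ 0 ≤ q1 ∧ q1 < 8
    · have hqn : (0 : Int) ≤ q0 * 8 + q1 := by omega
      rw [if_pos hP, if_pos hQ,
          PySem.List.pySetD_of_nonneg _ _ hqn, PySem.List.pySetD_of_nonneg _ _ hpn,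
          List.getElem?_set, List.getElem?_set]
      simp only [List.length_set, List.length_replicate, List.getElem?_replicate]
      split_ifs <;> first | rfl | omega
    · rw [if_pos hP, if_neg hQ, PySem.List.pySetD_of_nonneg _ _ hpn, List.getElem?_set]
      simp only [List.length_replicate, List.getElem?_replicate]
      split_ifs <;> first | rfl | omega
  · by_cases hQ : 0 ≤ q0 ∧ q0 < 8 ∧ 0 ≤ q1 ∧ q1 < 8
    · have hqn : (0 : Int) ≤ q0 * 8 + q1 := by omega
      rw [if_neg hP, if_pos hQ, PySem.List.pySetD_of_nonneg _ _ hqn, List.getElem?_set]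
      simp only [List.length_replicate, List.getElem?_replicate]
      split_ifs <;> first | rfl | omega
    · rw [if_neg hP, if_neg hQ]
      simp only [List.getElem?_replicate]
      split_ifs <;> first | rfl | omega

-- ===== VERDICT (by name: the statement is the Claim_ definition above) =====
theorem move_from_to_spec : Claim_equal_move_from_to := by
  intro pos move _hdom _hpre
  unfold Spec_move_from_to move_from_to move_from_to_alt
  dsimp only
  set p0 := PySem.List.pyGetD pos 0 0 with hp0
  set p1 := PySem.List.pyGetD pos 1 0 with hp1
  set m0 := PySem.List.pyGetD move 0 0 with hm0
  set m1 := PySem.List.pyGetD move 1 0 with hm1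
  have hinit : (PySem.List.pyRange 0 64 1).map (fun _ => (0 : Int)) = List.replicate 64 0 := by
    decide
  have hlen64 : PySem.List.len ((PySem.List.pyRange 0 64 1).map (fun _ => (0 : Int))) = 64 := by
    decide
  rw [hlen64, hinit]
  have hrange : PySem.List.pyRange 0 64 1 = (List.range 64).map (Nat.cast : Nat → Int) := by
    decide
  rw [hrange]
  have hfold :
      (((List.range 64).map (Nat.cast : Nat → Int)).foldl
        (fun r i =>
          if PySem.Int.floordiv i 8 = p0 ∧ PySem.Int.mod i 8 = p1 then
            PySem.List.pySetD r i (-1)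
          else if PySem.Int.floordiv i 8 = p0 + m0 ∧ PySem.Int.mod i 8 = p1 + m1 then
            PySem.List.pySetD r i 1
          else r) (List.replicate 64 0)) =
      (List.range 64).foldl
        (pvStep (fun i => PySem.Int.floordiv i 8 = p0 ∧ PySem.Int.mod i 8 = p1)
                (fun i => PySem.Int.floordiv i 8 = p0 + m0 ∧ PySem.Int.mod i 8 = p1 + m1))
        (List.replicate 64 0) := by
    rw [List.foldl_map]
    congr 1
    funext r k
    simp only [pvStep, PySem.List.pySetD_natCast]
  rw [hfold]
  apply List.ext_getElem?
  intro j
  rw [pvFold_getElem? _ _ 64 _ (by simp) j]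
  by_cases hj : j < 64
  · have hdiv : PySem.Int.floordiv (j : Int) 8 = (j : Int) / 8 :=
      PySem.Int.floordiv_eq_ediv_of_pos (by norm_num)
    have hmod : PySem.Int.mod (j : Int) 8 = (j : Int) % 8 :=
      PySem.Int.mod_eq_emod_of_pos (by norm_num)
    have hjI : (j : Int) < 64 := by exact_mod_cast hj
    have hc1 : (PySem.Int.floordiv (j : Int) 8 = p0 ∧ PySem.Int.mod (j : Int) 8 = p1) ↔
        (0 ≤ p0 ∧ p0 < 8 ∧ 0 ≤ p1 ∧ p1 < 8 ∧ (j : Int) = p0 * 8 + p1) := by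
      rw [hdiv, hmod]; omega
    have hc2 : (PySem.Int.floordiv (j : Int) 8 = p0 + m0 ∧
          PySem.Int.mod (j : Int) 8 = p1 + m1) ↔
        (0 ≤ p0 + m0 ∧ p0 + m0 < 8 ∧ 0 ≤ p1 + m1 ∧ p1 + m1 < 8 ∧
          (j : Int) = (p0 + m0) * 8 + (p1 + m1)) := by
      rw [hdiv, hmod]; omega
    rw [if_pos hj]
    rw [pvAlt_getElem? p0 p1 (p0 + m0) (p1 + m1) j hj]
    simp only [hc1, hc2, List.getElem?_replicate, hj, if_pos]
  · rw [if_neg hj]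
    have hA : (List.replicate 64 (0 : Int))[j]? = none := by
      rw [List.getElem?_eq_none] <;> simp <;> omega
    rw [hA]
    symm
    rw [List.getElem?_eq_none]
    split_ifs <;>
      simp only [PySem.List.length_pySetD, List.length_replicate] <;> omega
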